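-- pv_equiv track=rewrite | github.com/knutsvk/sandbox | euler/p113.py | generate_decreasing
-- ===== SOURCE A (Python) =====
-- def generate_decreasing(limit):
--     decreasing = [[1]*9]
--     i = 0
--     while len(decreasing) < limit:
--         i += 1
--         new_level = [sum(decreasing[i-1][:j+1])+1 for j in range(9)]
--         decreasing.append(new_level)
--     return decreasing
-- ===== SOURCE B (Python) =====
-- def _row(i):
--     # entry j of level i is the binomial coefficient C(i+j+1, j+1),
--     # built by the exact running product C(i+j+1, j+1) = C(i+j, j) * (i+j+1) // (j+1)
--     row = []
--     val = 1
--     for j in range(9):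
--         val = val * (i + j + 1) // (j + 1)
--         row.append(val)
--     return row
--
-- def generate_decreasing(limit):
--     result = [_row(0)]
--     i = 1
--     while len(result) < limit:
--         result.append(_row(i))
--         i += 1
--     return result
-- ===== Notes on version B (the rewrite author's own statement) =====
-- stated objective: faster
-- what changed: Each level is computed independently in closed form as binomial coefficients (entry j of level i is choose(i+j+1, j+1)) via one exact running product per row, instead of prefix-summing the previous level; rows no longer depend on each other.
import Mathlib
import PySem

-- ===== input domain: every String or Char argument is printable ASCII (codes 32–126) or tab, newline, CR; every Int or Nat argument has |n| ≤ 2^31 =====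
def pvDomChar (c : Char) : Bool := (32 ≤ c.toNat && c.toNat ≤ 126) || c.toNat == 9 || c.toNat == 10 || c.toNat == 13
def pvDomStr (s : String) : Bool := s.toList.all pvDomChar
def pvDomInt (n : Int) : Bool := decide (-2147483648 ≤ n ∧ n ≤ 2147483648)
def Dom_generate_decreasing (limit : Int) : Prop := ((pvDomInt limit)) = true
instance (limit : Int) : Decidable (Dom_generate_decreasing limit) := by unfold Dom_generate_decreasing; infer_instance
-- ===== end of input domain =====

-- B computes each level in closed form (binomial coefficients C(i+j+1, j+1) via one exact
-- running product per row) instead of prefix-summing the previous level (objective: alternative).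

-- ===== PORT A =====
-- new_level = [sum(decreasing[i-1][:j+1])+1 for j in range(9)]; decreasing[i-1] is the last row
def rowA (prev : List Int) : List Int :=
  (List.range 9).map (fun j => (prev.take (j + 1)).sum + 1)

-- while len(decreasing) < limit: runs (limit - 1).toNat times (len starts at 1, grows by 1)
def loopA : Nat → List (List Int) → List (List Int)
  | 0, acc => acc
  | n + 1, acc => loopA n (acc ++ [rowA (acc.getLastD [])])

def generate_decreasing (limit : Int) : List (List Int) :=
  loopA (limit - 1).toNat [[1, 1, 1, 1, 1, 1, 1, 1, 1]]

-- ===== PORT B =====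
-- _row(i): val = 1; for j in range(9): val = val * (i + j + 1) // (j + 1); row.append(val)
def rowB (i : Int) : List Int :=
  ((List.range 9).foldl
    (fun (st : Int × List Int) (j : Nat) =>
      let v := PySem.Int.floordiv (st.1 * (i + (j : Int) + 1)) ((j : Int) + 1)
      (v, st.2 ++ [v]))
    (1, [])).2

-- result = [_row(0)]; i = 1; while len(result) < limit: result.append(_row(i)); i += 1
def loopB : Nat → Int → List (List Int) → List (List Int)
  | 0, _, acc => acc
  | n + 1, i, acc => loopB n (i + 1) (acc ++ [rowB i])

def generate_decreasing_alt (limit : Int) : List (List Int) :=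
  loopB (limit - 1).toNat 1 [rowB 0]

-- ===== PRECONDITION & SPEC =====
def Spec_generate_decreasing (limit : Int) (out : List (List Int)) : Prop := out = generate_decreasing_alt limit
instance (limit : Int) (out : List (List Int)) : Decidable (Spec_generate_decreasing limit out) := by unfold Spec_generate_decreasing; infer_instance

-- ===== CLAIM (what is proved, stated in full; the proofs are below) =====
def Claim_equal_generate_decreasing : Prop := ∀ (limit : Int), Dom_generate_decreasing limit → Spec_generate_decreasing limit (generate_decreasing limit)

-- ===== LEMMAS AND PROOFS =====

-- the common characterisation: level i is [C(i+j+1, j+1) : j < 9]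
def binRow (i : Nat) : List Int :=
  (List.range 9).map (fun j => ((i + j + 1).choose (j + 1) : Int))

def bins (m : Nat) : List (List Int) := (List.range m).map binRow

-- B's running product: fold over range n yields (C(i+n, n), [C(i+j+1, j+1) : j < n])
theorem rowB_fold (i n : Nat) :
    (List.range n).foldl
      (fun (st : Int × List Int) (j : Nat) =>
        let v := PySem.Int.floordiv (st.1 * ((i : Int) + (j : Int) + 1)) ((j : Int) + 1)
        (v, st.2 ++ [v]))
      (1, [])
    = (((i + n).choose n : Int),
       (List.range n).map (fun j => ((i + j + 1).choose (j + 1) : Int))) := by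
  induction n with
  | zero => simp
  | succ n ih =>
    rw [List.range_succ, List.foldl_append, ih]
    have hNat : (i + n).choose n * (i + n + 1) = (i + n + 1).choose (n + 1) * (n + 1) := by
      have h := Nat.add_one_mul_choose_eq (i + n) n
      simpa [Nat.succ_eq_add_one, Nat.mul_comm] using h
    have hmul : ((i + n).choose n : Int) * ((i : Int) + (n : Int) + 1)
        = ((i + n + 1).choose (n + 1) : Int) * ((n : Int) + 1) := by
      exact_mod_cast hNat
    have hne : ((n : Int) + 1) ≠ 0 := by positivity
    simp only [List.foldl_cons, List.foldl_nil, PySem.Int.floordiv, hmul,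
      Int.mul_fdiv_cancel _ hne, List.map_append, List.map_cons, List.map_nil]
    simp [show i + (n + 1) = i + n + 1 from by omega]

theorem rowB_eq (i : Nat) : rowB (i : Int) = binRow i := by
  unfold rowB binRow
  rw [rowB_fold]

-- A's step: prefix sums of level i (plus 1) give level i+1 (hockey-stick identity)
theorem sum_prefix (i m : Nat) :
    ((List.range m).map (fun j => ((i + j + 1).choose (j + 1) : Int))).sum + 1
      = ((i + m + 1).choose m : Int) := by
  induction m with
  | zero => simp
  | succ m ih =>
    rw [List.range_succ, List.map_append, List.sum_append]
    simp only [List.map_cons, List.map_nil, List.sum_cons, List.sum_nil, add_zero]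
    have hc : ((i + (m + 1) + 1).choose (m + 1) : Int)
        = ((i + m + 1).choose m : Int) + ((i + m + 1).choose (m + 1) : Int) := by
      rw [show i + (m + 1) + 1 = (i + m + 1) + 1 by omega]
      push_cast [Nat.choose_succ_succ]
      ring
    rw [hc, ← ih]
    ring

theorem rowA_eq (i : Nat) : rowA (binRow i) = binRow (i + 1) := by
  unfold rowA binRow
  apply List.map_congr_left
  intro j hj
  rw [List.mem_range] at hj
  rw [← List.map_take, List.take_range, Nat.min_eq_left (by omega)]
  have := sum_prefix i (j + 1)
  rw [this]
  congr 2
  omega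

theorem bins_last (m : Nat) : (bins (m + 1)).getLastD [] = binRow m := by
  unfold bins
  rw [List.range_succ, List.map_append]
  simp

theorem bins_snoc (m : Nat) : bins m ++ [binRow m] = bins (m + 1) := by
  unfold bins
  rw [List.range_succ, List.map_append]
  simp

theorem loopA_bins (n m : Nat) : loopA n (bins (m + 1)) = bins (m + 1 + n) := by
  induction n generalizing m with
  | zero => simp [loopA]
  | succ n ih =>
    unfold loopA
    rw [bins_last, rowA_eq, bins_snoc, ih]
    congr 1
    omega

theorem loopB_bins (n m : Nat) : loopB n ((m : Int) + 1) (bins (m + 1)) = bins (m + 1 + n) := by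
  induction n generalizing m with
  | zero => simp [loopB]
  | succ n ih =>
    unfold loopB
    have h1 : ((m : Int) + 1) = ((m + 1 : Nat) : Int) := by push_cast; ring
    rw [h1, rowB_eq, bins_snoc]
    have := ih (m + 1)
    rw [show ((m + 1 : Nat) : Int) + 1 = ((m + 1 : Nat) : Int) + 1 from rfl] at this
    push_cast at this ⊢
    rw [show (m : Int) + 1 + 1 = (m : Int) + 2 by ring] at this ⊢
    rw [this]
    congr 1
    omega

-- ===== VERDICT (by name: the statement is the Claim_ definition above) =====
theorem generate_decreasing_spec : Claim_equal_generate_decreasing := by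
  intro limit _
  unfold Spec_generate_decreasing generate_decreasing generate_decreasing_alt
  have hA : [[1, 1, 1, 1, 1, 1, 1, 1, 1]] = bins 1 := by decide
  have hB : [rowB 0] = bins 1 := by
    have := rowB_eq 0
    simp only [Nat.cast_zero] at this
    rw [this, show bins 1 = [binRow 0] from by decide]
  rw [hA, hB]
  have h1 := loopA_bins (limit - 1).toNat 0
  have h2 := loopB_bins (limit - 1).toNat 0
  simp only [Nat.cast_zero, zero_add] at h1 h2
  rw [h1, h2]
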